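-- pv_equiv track=rewrite | github.com/cheddarfinancial/quarry-platform | chassis/util.py | processFormattedTableDescription
-- ===== SOURCE A (Python) =====
-- def processFormattedTableDescription(rows):
--
--     section = ""
--     cols = []
--     cached = False
--     for row in rows:
--
--         if len(row[0]) > 0 and row[0][0] == "#":
--
--             section = row[0].strip()
--
--         elif section == "# col_name" and len(row[0]) > 0:
--
--             cols.append({
--                 "name": row[0].strip(),
--                 "type": row[1].strip(),
--                 "comment": row[2].strip()
--             })
--
--         elif section == "# Detailed Table Information":
--
--             if row[1].strip() == "shark.cache" and row[2].strip() != "NONE":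
--                 cached = True
--
--     return cols, cached
-- ===== SOURCE B (Python) =====
-- def processFormattedTableDescription(rows):
--     # One pass partitions rows into buckets keyed by the active stripped '#'-header
--     # (initially ""), then cols/cached are read off the two relevant buckets.
--     buckets = {}
--     current = ""
--     for row in rows:
--         if len(row[0]) > 0 and row[0][0] == "#":
--             current = row[0].strip()
--         else:
--             buckets[current] = buckets.get(current, []) + [row]
--     cols = [{"name": r[0].strip(), "type": r[1].strip(), "comment": r[2].strip()}
--             for r in buckets.get("# col_name", []) if len(r[0]) > 0]
--     cached = any(r[1].strip() == "shark.cache" and r[2].strip() != "NONE"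
--                  for r in buckets.get("# Detailed Table Information", []))
--     return cols, cached
-- ===== Notes on version B (the rewrite author's own statement) =====
-- stated objective: alternative
-- what changed: B replaces A's single stateful loop (section flag steering three branches per row) by a partition pass that groups rows into per-section buckets, then derives cols by a comprehension over the '# col_name' bucket and cached by any() over the '# Detailed Table Information' bucket.
-- outside the precondition, e.g. on processFormattedTableDescription([['x'], ['# col_name']]): A returns ([], False), B returns ([], False)
import Mathlib
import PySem

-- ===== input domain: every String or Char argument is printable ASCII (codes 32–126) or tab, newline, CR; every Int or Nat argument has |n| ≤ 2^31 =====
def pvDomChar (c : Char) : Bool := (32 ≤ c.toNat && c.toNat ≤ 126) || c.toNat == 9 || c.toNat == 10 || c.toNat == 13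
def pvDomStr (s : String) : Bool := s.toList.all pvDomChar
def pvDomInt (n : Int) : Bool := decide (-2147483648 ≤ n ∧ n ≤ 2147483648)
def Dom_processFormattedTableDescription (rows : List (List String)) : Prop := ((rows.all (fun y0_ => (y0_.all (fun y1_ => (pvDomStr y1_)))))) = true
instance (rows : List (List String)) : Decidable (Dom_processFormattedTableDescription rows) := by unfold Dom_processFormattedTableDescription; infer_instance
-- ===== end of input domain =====

-- B partitions the rows into per-section buckets in one pass and reads cols/cached off
-- the two relevant buckets afterwards (objective: alternative decomposition, same cost).


-- ===== PORT A =====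
-- one loop step of A: (section, cols, cached) updated by one row; row[0] / row[1] / row[2]
-- are pyGet?/pyGetD (Pre_ keeps every access in range)
def pvStepA (st : String × List (List (String × String)) × Bool) (row : List String) :
    String × List (List (String × String)) × Bool :=
  match PySem.List.pyGet? row 0 with
  | none => st            -- Python: row[0] raises IndexError; excluded by Pre_
  | some c0 =>
    if 0 < PySem.Str.len c0 ∧ PySem.Str.pyGet? c0 0 = some '#' then
      (PySem.Str.strip c0, st.2.1, st.2.2)
    else if st.1 = "# col_name" ∧ 0 < PySem.Str.len c0 then
      (st.1,
       st.2.1 ++ [[("name", PySem.Str.strip c0),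
                   ("type", PySem.Str.strip (PySem.List.pyGetD row 1 "")),
                   ("comment", PySem.Str.strip (PySem.List.pyGetD row 2 ""))]],
       st.2.2)
    else if st.1 = "# Detailed Table Information" then
      if PySem.Str.strip (PySem.List.pyGetD row 1 "") = "shark.cache" ∧
         PySem.Str.strip (PySem.List.pyGetD row 2 "") ≠ "NONE" then
        (st.1, st.2.1, true)
      else st
    else st

def processFormattedTableDescription (rows : List (List String)) : (List (List (String × String))) × Bool :=
  let st := rows.foldl pvStepA ("", [], false)
  (st.2.1, st.2.2)

-- ===== PORT B =====
-- one loop step of B: (current, buckets); a non-header row is appended to bucket `current`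
def pvStepB (st : String × PySem.Dict String (List (List String))) (row : List String) :
    String × PySem.Dict String (List (List String)) :=
  match PySem.List.pyGet? row 0 with
  | none => st            -- Python: row[0] raises IndexError; excluded by Pre_
  | some c0 =>
    if 0 < PySem.Str.len c0 ∧ PySem.Str.pyGet? c0 0 = some '#' then
      (PySem.Str.strip c0, st.2)
    else (st.1, st.2.modify st.1 [] (fun l => l ++ [row]))

def pvGoodRow (r : List String) : Bool := decide (0 < PySem.Str.len (PySem.List.pyGetD r 0 ""))

def pvMkCol (r : List String) : List (String × String) :=
  [("name", PySem.Str.strip (PySem.List.pyGetD r 0 "")),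
   ("type", PySem.Str.strip (PySem.List.pyGetD r 1 "")),
   ("comment", PySem.Str.strip (PySem.List.pyGetD r 2 ""))]

def pvCachePred (r : List String) : Bool :=
  PySem.Str.strip (PySem.List.pyGetD r 1 "") == "shark.cache" &&
  PySem.Str.strip (PySem.List.pyGetD r 2 "") != "NONE"

def processFormattedTableDescription_alt (rows : List (List String)) : (List (List (String × String))) × Bool :=
  let st := rows.foldl pvStepB ("", PySem.Dict.empty)
  let cols := ((st.2.getD "# col_name" []).filter pvGoodRow).map pvMkCol
  let cached := (st.2.getD "# Detailed Table Information" []).any pvCachePred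
  (cols, cached)

-- ===== PRECONDITION & SPEC =====
def pvIsHeader (r : List String) : Bool :=
  match r with
  | [] => false
  | s :: _ => PySem.Str.startswith s "#"

-- Pre_ excludes the inputs on which Python A raises IndexError (an empty row, or a short
-- non-header row while a '# col_name' / '# Detailed Table Information' section is active);
-- for simplicity of the closed form, when one of those two headers occurs it also excludes
-- some short non-header rows A would tolerate (e.g. ones placed before the header), on
-- which A still returns — see the cites.
def Pre_processFormattedTableDescription (rows : List (List String)) : Prop :=
  (∀ r ∈ rows, r ≠ []) ∧
  ((∃ r ∈ rows, pvIsHeader r = true ∧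
      (PySem.Str.strip (r.headD "") = "# col_name" ∨
       PySem.Str.strip (r.headD "") = "# Detailed Table Information")) →
   ∀ r ∈ rows, pvIsHeader r = true ∨ 3 ≤ r.length)
instance (rows : List (List String)) : Decidable (Pre_processFormattedTableDescription rows) := by
  unfold Pre_processFormattedTableDescription; infer_instance

def pvWitness_processFormattedTableDescription : List (List String) :=
  [["# col_name"], ["a", "int", "c"], ["# Detailed Table Information"], ["x", "shark.cache", "yes"]]

def Spec_processFormattedTableDescription (rows : List (List String)) (out : (List (List (String × String))) × Bool) : Prop := out = processFormattedTableDescription_alt rows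
instance (rows : List (List String)) (out : (List (List (String × String))) × Bool) : Decidable (Spec_processFormattedTableDescription rows out) := by unfold Spec_processFormattedTableDescription; infer_instance

-- ===== CLAIM (what is proved, stated in full; the proofs are below) =====
def Claim_equal_processFormattedTableDescription : Prop := ∀ (rows : List (List String)), Dom_processFormattedTableDescription rows → Pre_processFormattedTableDescription rows → Spec_processFormattedTableDescription rows (processFormattedTableDescription rows)

-- ===== LEMMAS AND PROOFS =====

-- the rows that land in bucket `key` when the active section starts as `cur`
def pvCollect (key : String) : String → List (List String) → List (List String)
  | _, [] => []
  | cur, r :: rs =>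
    match PySem.List.pyGet? r 0 with
    | none => pvCollect key cur rs
    | some c0 =>
      if 0 < PySem.Str.len c0 ∧ PySem.Str.pyGet? c0 0 = some '#' then
        pvCollect key (PySem.Str.strip c0) rs
      else (if cur = key then [r] else []) ++ pvCollect key cur rs

theorem pvGetD_of_pyGet?_zero {r : List String} {c0 : String}
    (h : PySem.List.pyGet? r 0 = some c0) (d : String) : PySem.List.pyGetD r 0 d = c0 := by
  cases r with
  | nil => simp [PySem.List.pyGet?] at h
  | cons a t =>
    simp at h
    simpa [PySem.List.pyGetD_zero_cons] using h

theorem pvA_char (rs : List (List String)) : ∀ (cur : String)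
    (cols : List (List (String × String))) (cached : Bool),
    (rs.foldl pvStepA (cur, cols, cached)).2 =
      (cols ++ ((pvCollect "# col_name" cur rs).filter pvGoodRow).map pvMkCol,
       cached || (pvCollect "# Detailed Table Information" cur rs).any pvCachePred) := by
  induction rs with
  | nil => intro cur cols cached; simp [pvCollect]
  | cons r rs ih =>
    intro cur cols cached
    simp only [List.foldl_cons, pvStepA, pvCollect]
    cases hg : PySem.List.pyGet? r 0 with
    | none => simp [ih]
    | some c0 =>
      by_cases hh : 0 < PySem.Str.len c0 ∧ PySem.Str.pyGet? c0 0 = some '#'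
      · simp only [if_pos hh]
        simp [ih]
      · simp only [if_neg hh]
        by_cases hc : cur = "# col_name" ∧ 0 < PySem.Str.len c0
        · have hgd : pvGoodRow r = true := by
            simpa [pvGoodRow, pvGetD_of_pyGet?_zero hg] using hc.2
          simp only [if_pos hc]
          simp [hc.1, ih, pvMkCol, pvGetD_of_pyGet?_zero hg, hgd]
        · simp only [if_neg hc]
          by_cases hd : cur = "# Detailed Table Information"
          · by_cases hp : PySem.Str.strip (PySem.List.pyGetD r 1 "") = "shark.cache" ∧
                PySem.Str.strip (PySem.List.pyGetD r 2 "") ≠ "NONE"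
            · have hpt : pvCachePred r = true := by
                simp [pvCachePred, hp.1, hp.2]
              simp only [if_pos hd, if_pos hp]
              simp [hd, ih, hpt]
            · have hpf : pvCachePred r = false := by
                simp only [pvCachePred, Bool.and_eq_false_iff, bne_eq_false_iff_eq, beq_eq_false_iff_ne,
                  ne_eq, beq_iff_eq]
                by_cases h1 : PySem.Str.strip (PySem.List.pyGetD r 1 "") = "shark.cache"
                · right; by_cases h2 : PySem.Str.strip (PySem.List.pyGetD r 2 "") = "NONE"
                  · simpa using h2
                  · exact absurd ⟨h1, h2⟩ hp
                · left; simpa using h1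
              simp only [if_pos hd, if_neg hp]
              simp [hd, ih, hpf]
          · by_cases hcur : cur = "# col_name"
            · have hlen : ¬ 0 < PySem.Str.len c0 := fun h => hc ⟨hcur, h⟩
              have hgd : pvGoodRow r = false := by
                simp only [pvGoodRow, pvGetD_of_pyGet?_zero hg, decide_eq_false_iff_not]
                exact hlen
              simp only [if_neg hd]
              simp [hcur, ih, hgd]
            · simp only [if_neg hd]
              simp [hcur, ih]

theorem pvB_char (rs : List (List String)) : ∀ (cur : String)
    (d : PySem.Dict String (List (List String))) (key : String),
    ((rs.foldl pvStepB (cur, d)).2).getD key [] = d.getD key [] ++ pvCollect key cur rs := by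
  induction rs with
  | nil => intro cur d key; simp [pvCollect]
  | cons r rs ih =>
    intro cur d key
    simp only [List.foldl_cons, pvStepB, pvCollect]
    cases hg : PySem.List.pyGet? r 0 with
    | none => simp [ih]
    | some c0 =>
      by_cases hh : 0 < PySem.Str.len c0 ∧ PySem.Str.pyGet? c0 0 = some '#'
      · simp only [if_pos hh]
        simp [ih]
      · simp only [if_neg hh, ih]
        by_cases hk : cur = key
        · subst hk
          rw [PySem.Dict.getD_modify_self]
          simp
        · rw [PySem.Dict.getD_modify_of_ne]
          · simp [hk]
          · exact fun h => hk h.symm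

-- ===== VERDICT (by name: the statement is the Claim_ definition above) =====
theorem processFormattedTableDescription_spec : Claim_equal_processFormattedTableDescription := by
  intro rows _ _
  show _ = processFormattedTableDescription_alt rows
  simp only [processFormattedTableDescription, processFormattedTableDescription_alt]
  rw [pvA_char, pvB_char, pvB_char]
  simp [PySem.Dict.getD, PySem.Dict.empty, PySem.Dict.get?]
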